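-- pv_equiv track=rewrite | github.com/samgimagery/Scarlett | orpheus_bench/playback_queue_poc.py | trim_silence
-- ===== SOURCE A (Python) =====
-- def trim_silence(samples: list[int], threshold: int, keep: int) -> tuple[list[int], int, int]:
--     if not samples:
--         return samples, 0, 0
--     start = 0
--     while start < len(samples) and abs(samples[start]) < threshold:
--         start += 1
--     end = len(samples) - 1
--     while end > start and abs(samples[end]) < threshold:
--         end -= 1
--     trim_start = max(0, start - keep)
--     trim_end = min(len(samples), end + 1 + keep)
--     return samples[trim_start:trim_end], trim_start, len(samples) - trim_end
-- ===== SOURCE B (Python) =====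
-- def trim_silence(samples: list[int], threshold: int, keep: int) -> tuple[list[int], int, int]:
--     if not samples:
--         return samples, 0, 0
--     hits = [i for i, s in enumerate(samples) if abs(s) >= threshold]
--     if hits:
--         start, end = hits[0], hits[-1]
--     else:
--         start, end = len(samples), len(samples) - 1
--     trim_start = max(0, start - keep)
--     trim_end = min(len(samples), end + 1 + keep)
--     return samples[trim_start:trim_end], trim_start, len(samples) - trim_end
-- ===== Notes on version B (the rewrite author's own statement) =====
-- stated objective: simpler
-- what changed: Replaces A's two sentinel-controlled while loops (forward scan, then backward scan bounded by the forward result) with a single comprehension collecting all above-threshold indices, taking its first and last element; the degenerate no-hit case falls out as (len, len-1).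
import Mathlib
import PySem

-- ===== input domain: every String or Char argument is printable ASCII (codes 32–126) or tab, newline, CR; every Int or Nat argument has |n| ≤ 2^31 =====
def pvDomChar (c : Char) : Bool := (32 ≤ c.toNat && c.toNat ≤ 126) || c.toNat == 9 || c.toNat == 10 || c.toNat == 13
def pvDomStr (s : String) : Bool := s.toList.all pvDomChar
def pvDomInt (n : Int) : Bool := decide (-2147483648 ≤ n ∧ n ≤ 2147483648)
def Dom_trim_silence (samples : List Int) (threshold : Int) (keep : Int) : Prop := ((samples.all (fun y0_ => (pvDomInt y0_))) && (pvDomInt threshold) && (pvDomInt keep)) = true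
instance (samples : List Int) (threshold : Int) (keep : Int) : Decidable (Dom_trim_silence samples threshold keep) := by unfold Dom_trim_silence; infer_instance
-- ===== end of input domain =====

-- B replaces A's two while loops by one comprehension of above-threshold indices (simpler decomposition).


-- ===== PORT A =====
-- while start < len(samples) and abs(samples[start]) < threshold: start += 1
def trimStartLoop (samples : List Int) (threshold : Int) (start : Nat) : Nat :=
  if start < samples.length ∧ |samples.getD start 0| < threshold then
    trimStartLoop samples threshold (start + 1)
  else start
termination_by samples.length - start
decreasing_by omega

-- while end > start and abs(samples[end]) < threshold: end -= 1
def trimEndLoop (samples : List Int) (threshold : Int) (start e : Nat) : Nat :=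
  if start < e ∧ |samples.getD e 0| < threshold then
    trimEndLoop samples threshold start (e - 1)
  else e
termination_by e
decreasing_by omega

def trim_silence (samples : List Int) (threshold : Int) (keep : Int) : List Int × Int × Int :=
  if samples = [] then (samples, 0, 0)
  else
    let start := trimStartLoop samples threshold 0
    let e := trimEndLoop samples threshold start (samples.length - 1)
    let trim_start : Int := max 0 ((start : Int) - keep)
    let trim_end : Int := min (samples.length : Int) ((e : Int) + 1 + keep)
    (PySem.List.slice samples (some trim_start) (some trim_end), trim_start,
      (samples.length : Int) - trim_end)

-- ===== PORT B =====
def trim_silence_alt (samples : List Int) (threshold : Int) (keep : Int) : List Int × Int × Int :=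
  if samples = [] then (samples, 0, 0)
  else
    let hits : List Int :=
      ((PySem.List.enumerate samples 0).filter (fun p => decide (threshold ≤ |p.2|))).map Prod.fst
    let se : Int × Int :=
      match hits with
      | [] => ((samples.length : Int), (samples.length : Int) - 1)
      | h :: t => (h, (h :: t).getLast (List.cons_ne_nil h t))
    let trim_start : Int := max 0 (se.1 - keep)
    let trim_end : Int := min (samples.length : Int) (se.2 + 1 + keep)
    (PySem.List.slice samples (some trim_start) (some trim_end), trim_start,
      (samples.length : Int) - trim_end)

-- ===== PRECONDITION & SPEC =====
def Spec_trim_silence (samples : List Int) (threshold : Int) (keep : Int) (out : List Int × Int × Int) : Prop := out = trim_silence_alt samples threshold keep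
instance (samples : List Int) (threshold : Int) (keep : Int) (out : List Int × Int × Int) : Decidable (Spec_trim_silence samples threshold keep out) := by unfold Spec_trim_silence; infer_instance

-- ===== CLAIM (what is proved, stated in full; the proofs are below) =====
def Claim_equal_trim_silence : Prop := ∀ (samples : List Int) (threshold : Int) (keep : Int), Dom_trim_silence samples threshold keep → Spec_trim_silence samples threshold keep (trim_silence samples threshold keep)

-- ===== LEMMAS AND PROOFS =====

-- Nat-index hit list
def hitsN (samples : List Int) (threshold : Int) : List Nat :=
  (List.range samples.length).filter (fun j => decide (threshold ≤ |samples.getD j 0|))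

theorem hitsN_spec (samples : List Int) (threshold : Int) (j : Nat) :
    j ∈ hitsN samples threshold ↔ j < samples.length ∧ threshold ≤ |samples.getD j 0| := by
  simp [hitsN, List.mem_filter, List.mem_range]

theorem hits_eq_map (samples : List Int) (threshold : Int) :
    ((PySem.List.enumerate samples 0).filter (fun p => decide (threshold ≤ |p.2|))).map Prod.fst
      = (hitsN samples threshold).map (Nat.cast : Nat → Int) := by
  rw [PySem.List.enumerate_eq_map_pyRange (d := 0)]
  simp only [PySem.List.len_eq, PySem.List.pyRange_zero_natCast]
  simp [hitsN, List.filter_map, List.map_map, Function.comp_def, List.getD_eq_getElem?_getD]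

-- sorted helpers
theorem le_getLast_of_pairwise (l : List Nat) (h : l ≠ []) (hp : l.Pairwise (· < ·)) :
    ∀ x ∈ l, x ≤ l.getLast h := by
  induction l with
  | nil => cases h rfl
  | cons a t ih =>
    intro x hx
    cases t with
    | nil => simp at hx; simp [hx, List.getLast]
    | cons b u =>
      rw [List.getLast_cons (List.cons_ne_nil b u)]
      rcases List.mem_cons.mp hx with rfl | hxt
      · have := (List.pairwise_cons.mp hp).1 _ (List.getLast_mem (List.cons_ne_nil b u))
        omega
      · exact ih (List.cons_ne_nil b u) (List.pairwise_cons.mp hp).2 x hxt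

theorem hitsN_pairwise (samples : List Int) (threshold : Int) :
    (hitsN samples threshold).Pairwise (· < ·) :=
 by
  exact List.Pairwise.sublist List.filter_sublist List.pairwise_lt_range

-- start loop: no hit at or after i up to len → returns len
theorem startLoop_nohit (samples : List Int) (threshold : Int) :
    ∀ n i, samples.length - i = n → i ≤ samples.length →
      (∀ j, i ≤ j → j < samples.length → |samples.getD j 0| < threshold) →
      trimStartLoop samples threshold i = samples.length := by
  intro n
  induction n with
  | zero =>
    intro i hn hi _
    rw [trimStartLoop]
    have : ¬ (i < samples.length ∧ |samples.getD i 0| < threshold) := by omega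
    rw [if_neg this]; omega
  | succ m ih =>
    intro i hn hi hall
    rw [trimStartLoop]
    by_cases hc : i < samples.length ∧ |samples.getD i 0| < threshold
    · simp only [if_pos hc]
      exact ih (i+1) (by omega) (by omega) (fun j h1 h2 => hall j (by omega) h2)
    · have hi' : i < samples.length := by omega
      exact absurd ⟨hi', hall i le_rfl hi'⟩ hc

-- start loop: first hit k0 → returns k0
theorem startLoop_hit (samples : List Int) (threshold : Int) :
    ∀ n i k0, k0 - i = n → i ≤ k0 → k0 < samples.length →
      threshold ≤ |samples.getD k0 0| →
      (∀ j, i ≤ j → j < k0 → |samples.getD j 0| < threshold) →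
      trimStartLoop samples threshold i = k0 := by
  intro n
  induction n with
  | zero =>
    intro i k0 hn h1 h2 h3 _
    have : i = k0 := by omega
    subst this
    rw [trimStartLoop]
    have : ¬ (i < samples.length ∧ |samples.getD i 0| < threshold) := by
      rintro ⟨_, h⟩; omega
    rw [if_neg this]
  | succ m ih =>
    intro i k0 hn h1 h2 h3 hmin
    have hik : i < k0 := by omega
    rw [trimStartLoop]
    have hc : i < samples.length ∧ |samples.getD i 0| < threshold :=
      ⟨by omega, hmin i le_rfl hik⟩
    simp only [if_pos hc]
    exact ih (i+1) k0 (by omega) (by omega) h2 h3 (fun j ha hb => hmin j (by omega) hb)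

-- end loop: last hit kL in (b, len) with b ≤ kL ≤ e → returns kL
theorem endLoop_hit (samples : List Int) (threshold : Int) :
    ∀ e b kL, b ≤ kL → kL ≤ e → e < samples.length →
      threshold ≤ |samples.getD kL 0| →
      (∀ j, kL < j → j ≤ e → |samples.getD j 0| < threshold) →
      trimEndLoop samples threshold b e = kL := by
  intro e
  induction e using Nat.strong_induction_on with
  | _ e ih =>
    intro b kL h1 h2 h3 h4 hmax
    rw [trimEndLoop]
    by_cases hc : b < e ∧ |samples.getD e 0| < threshold
    · simp only [if_pos hc]
      have hke : kL < e := by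
        rcases Nat.lt_or_ge kL e with h | h
        · exact h
        · have : kL = e := by omega
          subst this; omega
      exact ih (e-1) (by omega) b kL h1 (by omega) (by omega) h4
        (fun j ha hb => hmax j ha (by omega))
    · simp only [hc, if_false]
      by_contra hne
      have hke : kL < e := by omega
      have hbe : b < e := by omega
      have := hmax e hke le_rfl
      exact hc ⟨hbe, this⟩

theorem endLoop_stop (samples : List Int) (threshold : Int) (b e : Nat) (h : ¬ b < e) :
    trimEndLoop samples threshold b e = e := by
  rw [trimEndLoop]
  have : ¬ (b < e ∧ |samples.getD e 0| < threshold) := by tauto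
  rw [if_neg this]

theorem hitsN_nil_iff (samples : List Int) (threshold : Int) :
    hitsN samples threshold = [] ↔
      ∀ j, j < samples.length → |samples.getD j 0| < threshold := by
  constructor
  · intro h j hj
    by_contra hcon
    have : j ∈ hitsN samples threshold := (hitsN_spec _ _ _).mpr ⟨hj, by omega⟩
    simp [h] at this
  · intro h
    rw [List.eq_nil_iff_forall_not_mem]
    intro j hj
    have := (hitsN_spec _ _ _).mp hj
    have := h j this.1
    omega

theorem trim_silence_spec : Claim_equal_trim_silence := by
  intro samples threshold keep _
  unfold Spec_trim_silence trim_silence trim_silence_alt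
  by_cases hne : samples = []
  · simp [hne]
  · simp only [hne, if_false]
    rw [hits_eq_map samples threshold]
    have hlen : 1 ≤ samples.length := by
      cases samples with | nil => cases hne rfl | cons a t => simp
    rcases hn : hitsN samples threshold with _ | ⟨k0, t⟩
    · -- no hits
      have hall := (hitsN_nil_iff samples threshold).mp hn
      have hs : trimStartLoop samples threshold 0 = samples.length :=
        startLoop_nohit samples threshold samples.length 0 (by omega) (by omega)
          (fun j _ hj => hall j hj)
      have he : trimEndLoop samples threshold samples.length
          (samples.length - 1) = samples.length - 1 :=
        endLoop_stop _ _ _ _ (by omega)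
      rw [hs, he]
      simp only [List.map_nil]
      have hcast : ((samples.length - 1 : Nat) : Int) = (samples.length : Int) - 1 := by omega
      rw [hcast]
    · -- hits nonempty
      have hne' : hitsN samples threshold ≠ [] := by rw [hn]; exact List.cons_ne_nil _ _
      set kL := (hitsN samples threshold).getLast hne' with hkL
      have hpair := hitsN_pairwise samples threshold
      have hk0mem : k0 ∈ hitsN samples threshold := by rw [hn]; exact List.mem_cons_self
      have hkLmem : kL ∈ hitsN samples threshold := List.getLast_mem hne'
      have hk0 := (hitsN_spec _ _ _).mp hk0mem
      have hkLs := (hitsN_spec _ _ _).mp hkLmem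
      have hmin : ∀ j ∈ hitsN samples threshold, k0 ≤ j := by
        intro j hj
        rw [hn] at hj hpair
        rcases List.mem_cons.mp hj with rfl | hjt
        · exact le_rfl
        · exact le_of_lt ((List.pairwise_cons.mp hpair).1 j hjt)
      have hmax : ∀ j ∈ hitsN samples threshold, j ≤ kL :=
        le_getLast_of_pairwise _ hne' hpair
      have hs : trimStartLoop samples threshold 0 = k0 :=
        startLoop_hit samples threshold k0 0 k0 (by omega) (by omega) hk0.1 hk0.2
          (fun j _ hj => by
            by_contra hcon
            have : j ∈ hitsN samples threshold :=
              (hitsN_spec _ _ _).mpr ⟨by omega, by omega⟩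
            have := hmin j this; omega)
      have hk0L : k0 ≤ kL := hmin kL hkLmem
      have he : trimEndLoop samples threshold k0 (samples.length - 1) = kL :=
        endLoop_hit samples threshold (samples.length - 1) k0 kL hk0L (by omega)
          (by omega) hkLs.2
          (fun j hj1 hj2 => by
            by_contra hcon
            have : j ∈ hitsN samples threshold :=
              (hitsN_spec _ _ _).mpr ⟨by omega, by omega⟩
            have := hmax j this; omega)
      have hgl : ((k0 :: t).map (Nat.cast : Nat → Int)).getLast (by simp) = (kL : Int) := by
        have h1 : ((k0 :: t).map (Nat.cast : Nat → Int)).getLast? = some (kL : Int) := by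
          rw [List.getLast?_map, ← hn, hkL, List.getLast?_eq_some_getLast hne']
          rfl
        have h2 := List.getLast?_eq_some_getLast (l := ((k0 :: t).map (Nat.cast : Nat → Int))) (by simp)
        rw [h2] at h1
        exact Option.some.inj h1
      rw [hs, he]
      simp only [List.map_cons] at hgl ⊢
      rw [hgl]
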